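-- pv_equiv track=rewrite | github.com/ragrr4/AdventOfCode2023 | Day_1/day1-2.py | replace_string_numbers
-- ===== SOURCE A (Python) =====
-- def replace_string_numbers(line):
--     number_names = ["one", "two", "three", "four", "five", "six", "seven", "eight", "nine"]
--     replace_idx = []
--     for i, number_str in enumerate(number_names):
--         last_index_found = line.find(number_str,0)
--         while(last_index_found != -1):
--             line = line[:last_index_found + 1] + str(i+1) + line[last_index_found+1:]
--             last_index_found = line.find(number_str,last_index_found + 1)
--     return line
-- ===== SOURCE B (Python) =====
-- def replace_string_numbers(line):
--     number_names = ["one", "two", "three", "four", "five", "six", "seven", "eight", "nine"]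
--     out = []
--     for i in range(len(line)):
--         out.append(line[i])
--         for w_idx, w in enumerate(number_names):
--             if line.startswith(w, i):
--                 out.append(str(w_idx + 1))
--                 break
--     return "".join(out)
-- ===== Notes on version B (the rewrite author's own statement) =====
-- stated objective: alternative
-- what changed: Single left-to-right pass that emits each character and, right after it, the digit of the (unique) number word starting there, instead of nine repeated find-and-rebuild insertion loops over a growing string.
import Mathlib
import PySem

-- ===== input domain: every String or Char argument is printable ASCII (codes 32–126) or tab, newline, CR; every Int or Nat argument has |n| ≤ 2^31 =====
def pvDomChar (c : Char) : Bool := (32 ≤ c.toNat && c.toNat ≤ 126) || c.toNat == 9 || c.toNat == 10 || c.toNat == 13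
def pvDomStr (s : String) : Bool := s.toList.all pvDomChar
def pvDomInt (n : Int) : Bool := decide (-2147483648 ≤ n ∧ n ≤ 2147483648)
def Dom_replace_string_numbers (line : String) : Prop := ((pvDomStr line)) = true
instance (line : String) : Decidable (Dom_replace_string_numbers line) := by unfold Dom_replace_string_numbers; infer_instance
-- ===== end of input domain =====

-- B replaces A's nine repeated find-and-rebuild insertion loops by one left-to-right pass
-- that emits each character followed by the digit of the number word starting there (alternative algorithm, same result).

-- ===== PORT A =====
-- number_names with str(i+1) precomputed as the pair list ("one" ↦ '1', …), as A's enumerate produces them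
def pvNamesA : List (List Char × Char) :=
  [(['o','n','e'], '1'), (['t','w','o'], '2'), (['t','h','r','e','e'], '3'),
   (['f','o','u','r'], '4'), (['f','i','v','e'], '5'), (['s','i','x'], '6'),
   (['s','e','v','e','n'], '7'), (['e','i','g','h','t'], '8'), (['n','i','n','e'], '9')]

-- A's inner while loop: state is (line, last_index_found); fuel only makes the recursion total
-- (it is proved never to run out: each insertion consumes one occurrence).
def loopA (v : List Char) (d : Char) : ℕ → List Char → Int → List Char
  | 0, line, _ => line
  | fuel + 1, line, idx =>
    if idx = -1 then line
    else
      -- line = line[:idx+1] + d + line[idx+1:]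
      let line' := PySem.Chars.slice line none (some (idx + 1)) ++ [d] ++
                   PySem.Chars.slice line (some (idx + 1)) none
      loopA v d fuel line' (PySem.Chars.findFrom line' v (idx + 1) none)

def replace_string_numbers (line : String) : String :=
  String.mk (pvNamesA.foldl
    (fun l wd => loopA wd.1 wd.2 (l.length + 1) l (PySem.Chars.findFrom l wd.1 0 none))
    line.toList)

-- ===== PORT B =====
-- Source B's scan over enumerate(line) (the word/digit table is the shared constant pvNamesA): line.startswith(w, i) is exactly w.isPrefixOf (suffix at i),
-- so the index loop is the obvious structural recursion on the suffix.
def goB : List Char → List Char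
  | [] => []
  | c :: t =>
    c :: ((match pvNamesA.find? (fun wd => wd.1.isPrefixOf (c :: t)) with
           | some wd => [wd.2]
           | none => []) ++ goB t)

def replace_string_numbers_alt (line : String) : String :=
  String.mk (goB line.toList)

-- ===== PRECONDITION & SPEC =====
def Spec_replace_string_numbers (line : String) (out : String) : Prop := out = replace_string_numbers_alt line
instance (line : String) (out : String) : Decidable (Spec_replace_string_numbers line out) := by unfold Spec_replace_string_numbers; infer_instance

-- ===== CLAIM (what is proved, stated in full; the proofs are below) =====
def Claim_equal_replace_string_numbers : Prop := ∀ (line : String), Dom_replace_string_numbers line → Spec_replace_string_numbers line (replace_string_numbers line)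

-- ===== LEMMAS AND PROOFS =====

-- one-word pass: emit every char, with d right after a position where v matches
def insW (v : List Char) (d : Char) : List Char → List Char
  | [] => []
  | c :: t => c :: (if v <+: (c :: t) then d :: insW v d t else insW v d t)

-- number of positions where v matches
def occ (v : List Char) : List Char → ℕ
  | [] => 0
  | c :: t => (if v <+: (c :: t) then 1 else 0) + occ v t

-- multi-word single pass, goB generalized over the word table
def passW (ws : List (List Char × Char)) : List Char → List Char
  | [] => []
  | c :: t =>
    c :: ((match ws.find? (fun wd => wd.1.isPrefixOf (c :: t)) with
           | some wd => [wd.2]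
           | none => []) ++ passW ws t)

theorem passW_nil (l : List Char) : passW [] l = l := by
  induction l with
  | nil => rfl
  | cons c t ih => simp [passW, ih]

theorem goB_eq (l : List Char) : goB l = passW pvNamesA l := by
  induction l with
  | nil => rfl
  | cons c t ih => simp [goB, passW, ih]

theorem insW_noMatch (v : List Char) (d : Char) :
    ∀ u : List Char, (∀ k, ¬ v <+: u.drop k) → insW v d u = u := by
  intro u
  induction u with
  | nil => intro _; rfl
  | cons c t ih =>
    intro h
    have h0 : ¬ v <+: (c :: t) := h 0
    simp only [insW, if_neg h0]
    rw [ih (fun k => h (k + 1))]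

theorem insW_firstMatch (v : List Char) (d : Char) (hv : v ≠ []) :
    ∀ (k : ℕ) (u : List Char), (∀ p, p < k → ¬ v <+: u.drop p) → v <+: u.drop k →
      insW v d u = u.take (k + 1) ++ d :: insW v d (u.drop (k + 1)) := by
  intro k
  induction k with
  | zero =>
    intro u _ hm
    simp only [List.drop_zero] at hm
    cases u with
    | nil => exact absurd (List.prefix_nil.mp hm) hv
    | cons c t => simp [insW, if_pos hm]
  | succ k ih =>
    intro u hp hm
    cases u with
    | nil => simp at hm; exact absurd hm hv
    | cons c t =>
      have h0 : ¬ v <+: (c :: t) := by simpa using hp 0 (Nat.succ_pos k)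
      simp only [insW, if_neg h0]
      rw [ih t (fun p hpk => by simpa using hp (p + 1) (by omega)) (by simpa using hm)]
      simp [List.take_succ_cons]

theorem occ_le_length (v : List Char) : ∀ u : List Char, occ v u ≤ u.length := by
  intro u
  induction u with
  | nil => simp [occ]
  | cons c t ih =>
    simp only [occ, List.length_cons]
    split_ifs <;> omega

theorem occ_cons_noMatch (v : List Char) {c : Char} {t : List Char} (h : ¬ v <+: (c :: t)) :
    occ v (c :: t) = occ v t := by simp [occ, if_neg h]

theorem occ_drop_noMatchBelow (v : List Char) :
    ∀ (k : ℕ) (u : List Char), (∀ p, p < k → ¬ v <+: u.drop p) → occ v u = occ v (u.drop k) := by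
  intro k
  induction k with
  | zero => intro u _; simp
  | succ k ih =>
    intro u hp
    cases u with
    | nil => simp
    | cons c t =>
      have h0 : ¬ v <+: (c :: t) := by simpa using hp 0 (Nat.succ_pos k)
      rw [occ_cons_noMatch v h0, ih t (fun p hpk => by simpa using hp (p + 1) (by omega))]
      simp

-- A's inner loop computes the one-word pass (fuel never runs out).
theorem loopA_eq (v : List Char) (d : Char) (hv2 : 2 ≤ v.length) (hd : ∀ b ∈ v, b ≠ d) :
    ∀ (fuel : ℕ) (l : List Char) (s : ℕ), s ≤ l.length → occ v (l.drop s) < fuel →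
      loopA v d fuel l (PySem.Chars.findFrom l v (s : Int) none) =
        l.take s ++ insW v d (l.drop s) := by
  have hv : v ≠ [] := by intro h; rw [h] at hv2; simp at hv2
  intro fuel
  induction fuel with
  | zero => intro l s _ hocc; omega
  | succ fuel ih =>
    intro l s hs hocc
    by_cases hneg : PySem.Chars.findFrom l v (s : Int) none = -1
    · -- no further occurrence: the loop returns line unchanged
      rw [hneg]
      have hstop : loopA v d (fuel + 1) l (-1) = l := by simp [loopA]
      rw [hstop]
      have hinf : ¬ v <:+: l.drop s := (PySem.Chars.findFrom_natCast_eq_neg_one_iff l v s hs).mp hneg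
      have hno : ∀ k, ¬ v <+: (l.drop s).drop k := by
        intro k hk
        exact hinf ((PySem.Chars.isIn_iff_infix v (l.drop s)).mp
          ((PySem.Chars.exists_prefix_drop_iff_isIn v (l.drop s)).mp ⟨k, hk⟩))
      rw [insW_noMatch v d (l.drop s) hno, List.take_append_drop]
    · obtain ⟨hle, hmatch, hmin⟩ := PySem.Chars.findFrom_natCast_spec l v s hs hneg
      set r := PySem.Chars.findFrom l v (s : Int) none with hr
      have hr0 : 0 ≤ r := le_trans (by exact_mod_cast Int.ofNat_nonneg s) hle
      set i := r.toNat with hi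
      have hri : r = (i : Int) := (Int.toNat_of_nonneg hr0).symm
      have hsi : s ≤ i := by omega
      have hilt : i < l.length := by
        by_contra hcon
        have : l.drop i = [] := List.drop_eq_nil_of_le (by omega)
        rw [this] at hmatch
        exact hv (List.prefix_nil.mp hmatch)
      simp only [loopA]
      rw [if_neg hneg]
      have hcast : r + 1 = ((i + 1 : ℕ) : Int) := by omega
      rw [hcast]
      have hsl1 : PySem.Chars.slice l none (some ((i + 1 : ℕ) : Int)) = l.take (i + 1) := by
        rw [PySem.Chars.slice_eq_listSlice, PySem.List.slice_to l (by omega)]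
        simp
      have hsl2 : PySem.Chars.slice l (some ((i + 1 : ℕ) : Int)) none = l.drop (i + 1) := by
        rw [PySem.Chars.slice_eq_listSlice, PySem.List.slice_from l (by omega)]
        simp
      rw [hsl1, hsl2]
      set l' := l.take (i + 1) ++ [d] ++ l.drop (i + 1) with hl'
      have hdropKey : ∀ (A B : List Char) (n : ℕ), A.length = n → (A ++ B).drop n = B := by
        intro A B n h; subst h; exact List.drop_left
      have htakeKey : ∀ (A B : List Char) (n : ℕ), A.length = n → (A ++ B).take n = A := by
        intro A B n h; subst h; exact List.take_left
      have hlt : (l.take (i + 1)).length = i + 1 := by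
        simp [List.length_take, Nat.min_eq_left (by omega : i + 1 ≤ l.length)]
      have hdrop' : l'.drop (i + 1) = d :: l.drop (i + 1) := by
        rw [hl', List.append_assoc, List.singleton_append]
        exact hdropKey _ _ _ hlt
      have htake' : l'.take (i + 1) = l.take (i + 1) := by
        rw [hl', List.append_assoc, List.singleton_append]
        exact htakeKey _ _ _ hlt
      have hv0 : ∀ t : List Char, ¬ v <+: d :: t := by
        intro t hpre
        cases v with
        | nil => exact hv rfl
        | cons v0 vt =>
          have := (List.cons_prefix_cons.mp hpre).1
          exact hd v0 (List.mem_cons_self) this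
      -- occurrence bookkeeping
      have hocc_eq : occ v (l.drop s) = occ v (l.drop i) := by
        rw [occ_drop_noMatchBelow v (i - s) (l.drop s)
          (fun p hp => by
            rw [List.drop_drop]
            exact hmin (s + p) (by omega) (by omega)), List.drop_drop,
          show s + (i - s) = i from by omega]
      have hocc_i : occ v (l.drop i) = 1 + occ v (l.drop (i + 1)) := by
        rw [List.drop_eq_getElem_cons hilt]
        simp only [occ]
        rw [if_pos (by rwa [← List.drop_eq_getElem_cons hilt])]
      have hocc' : occ v (l'.drop (i + 1)) < fuel := by
        rw [hdrop']
        have : occ v (d :: l.drop (i + 1)) = occ v (l.drop (i + 1)) :=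
          occ_cons_noMatch v (hv0 _)
        omega
      have hs' : i + 1 ≤ l'.length := by
        rw [hl']
        simp only [List.length_append, List.length_cons, List.length_nil, hlt]
        omega
      rw [ih l' (i + 1) hs' hocc', hdrop', htake']
      -- right side: first match of (l.drop s) is at position i - s
      have hfm : insW v d (l.drop s) =
          (l.drop s).take (i - s + 1) ++ d :: insW v d ((l.drop s).drop (i - s + 1)) := by
        apply insW_firstMatch v d hv (i - s) (l.drop s)
        · intro p hp
          rw [List.drop_drop]
          exact hmin (s + p) (by omega) (by omega)
        · rw [List.drop_drop, show s + (i - s) = i from by omega]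
          exact hmatch
      rw [hfm, List.drop_drop, show s + (i - s + 1) = i + 1 from by omega]
      have htk : l.take s ++ (l.drop s).take (i - s + 1) = l.take (i + 1) := by
        rw [← List.take_add, show s + (i - s + 1) = i + 1 from by omega]
      rw [← List.append_assoc, htk]
      have hins : insW v d (d :: l.drop (i + 1)) = d :: insW v d (l.drop (i + 1)) := by
        simp [insW, if_neg (hv0 (l.drop (i + 1)))]
      rw [hins]

-- the prefix test is unaffected by the digits an earlier pass inserted
theorem pref_pass (ws : List (List Char × Char)) (v : List Char)
    (hD : ∀ b ∈ v, ∀ wd ∈ ws, b ≠ wd.2)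
    (hAll : ∀ u ∈ v.tails, 2 ≤ u.length → ∀ wd ∈ ws, ¬ (u <+: wd.1) ∧ ¬ (wd.1 <+: u)) :
    ∀ (u : List Char), u <:+ v → ∀ (t : List Char), (u <+: passW ws t ↔ u <+: t) := by
  intro u
  induction u with
  | nil => intro _ t; simp
  | cons a u' ih =>
    intro hsuf t
    cases t with
    | nil => simp [passW]
    | cons c t' =>
      simp only [passW]
      cases hfind : ws.find? (fun wd => wd.1.isPrefixOf (c :: t')) with
      | some wd =>
        have hwdmem : wd ∈ ws := List.mem_of_find?_eq_some hfind
        have hwdpre : wd.1 <+: (c :: t') := by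
          have hp := List.find?_some hfind
          exact List.isPrefixOf_iff_prefix.mp (by simpa using hp)
        cases u' with
        | nil => simp [List.cons_prefix_cons]
        | cons b u'' =>
          constructor
          · intro h
            have hb : b = wd.2 := ((List.cons_prefix_cons.mp
              (List.cons_prefix_cons.mp h).2).1)
            exact absurd hb (hD b (hsuf.subset (by simp)) wd hwdmem)
          · intro h
            exfalso
            have h2 : 2 ≤ (a :: b :: u'').length := by simp
            have hnp := hAll (a :: b :: u'') ((List.mem_tails _ _).mpr hsuf) h2 wd hwdmem
            rcases List.prefix_or_prefix_of_prefix h hwdpre with hc | hc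
            · exact hnp.1 hc
            · exact hnp.2 hc
      | none =>
        have ih' := ih (List.IsSuffix.trans (List.suffix_cons a u') hsuf) t'
        simp only [List.cons_prefix_cons, List.nil_append]
        rw [ih']

-- composing one more word's insertion pass onto the multi-word pass extends the table
theorem compose (v : List Char) (d : Char) (ws : List (List Char × Char))
    (hv2 : 2 ≤ v.length)
    (hD : ∀ b ∈ v, ∀ wd ∈ ws, b ≠ wd.2)
    (hAll : ∀ u ∈ v.tails, 2 ≤ u.length → ∀ wd ∈ ws, ¬ (u <+: wd.1) ∧ ¬ (wd.1 <+: u)) :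
    ∀ l : List Char, insW v d (passW ws l) = passW (ws ++ [(v, d)]) l := by
  intro l
  induction l with
  | nil => simp [passW, insW]
  | cons c t ih =>
    simp only [passW, List.find?_append]
    cases hfind : ws.find? (fun wd => wd.1.isPrefixOf (c :: t)) with
    | some wd =>
      have hwdmem : wd ∈ ws := List.mem_of_find?_eq_some hfind
      obtain ⟨v0, v1, vr, hveq⟩ : ∃ v0 v1 vr, v = v0 :: v1 :: vr := by
        cases v with
        | nil => simp at hv2
        | cons v0 vt =>
          cases vt with
          | nil => simp at hv2
          | cons v1 vr => exact ⟨v0, v1, vr, rfl⟩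
      have hnm1 : ¬ v <+: (c :: wd.2 :: passW ws t) := by
        rw [hveq]
        intro h
        have := (List.cons_prefix_cons.mp (List.cons_prefix_cons.mp h).2).1
        exact hD v1 (by rw [hveq]; simp) wd hwdmem this
      have hnm2 : ¬ v <+: (wd.2 :: passW ws t) := by
        rw [hveq]
        intro h
        exact hD v0 (by rw [hveq]; simp) wd hwdmem (List.cons_prefix_cons.mp h).1
      simp [insW, hnm1, hnm2, ih]
    | none =>
      simp only [List.nil_append]
      have hiff : v <+: (c :: passW ws t) ↔ v <+: (c :: t) := by
        have := pref_pass ws v hD hAll v (List.suffix_refl v) (c :: t)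
        simpa [passW, hfind] using this
      by_cases hm : v <+: (c :: t)
      · have hpt : (v, d).1.isPrefixOf (c :: t) = true := List.isPrefixOf_iff_prefix.mpr hm
        simp [insW, hiff.mpr hm, ih, hpt]
      · have hpt : (v, d).1.isPrefixOf (c :: t) = false := by
          rw [Bool.eq_false_iff]
          intro h; exact hm (List.isPrefixOf_iff_prefix.mp h)
        have hnm : ¬ v <+: c :: passW ws t := fun h => hm (hiff.mp h)
        simp [insW, hnm, ih, hpt]

-- one full word of A's outer loop, applied to the pass-result of the earlier words
theorem perWord (v : List Char) (d : Char) (hv2 : 2 ≤ v.length) (hd : ∀ b ∈ v, b ≠ d)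
    (l : List Char) :
    loopA v d (l.length + 1) l (PySem.Chars.findFrom l v 0 none) = insW v d l := by
  have hocc : occ v (l.drop 0) < l.length + 1 := by
    have := occ_le_length v (l.drop 0)
    simp only [List.drop_zero] at this ⊢
    omega
  have h := loopA_eq v d hv2 hd (l.length + 1) l 0 (by omega) hocc
  simpa using h

theorem stepWord (v : List Char) (d : Char) (ws : List (List Char × Char))
    (hv2 : 2 ≤ v.length) (hd : ∀ b ∈ v, b ≠ d)
    (hD : ∀ b ∈ v, ∀ wd ∈ ws, b ≠ wd.2)
    (hAll : ∀ u ∈ v.tails, 2 ≤ u.length → ∀ wd ∈ ws, ¬ (u <+: wd.1) ∧ ¬ (wd.1 <+: u))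
    (l : List Char) :
    loopA v d ((passW ws l).length + 1) (passW ws l)
        (PySem.Chars.findFrom (passW ws l) v 0 none) = passW (ws ++ [(v, d)]) l := by
  rw [perWord v d hv2 hd (passW ws l), compose v d ws hv2 hD hAll l]

-- ===== VERDICT (by name: the statement is the Claim_ definition above) =====

theorem chainAll (l0 : List Char) :
    pvNamesA.foldl
      (fun l wd => loopA wd.1 wd.2 (l.length + 1) l (PySem.Chars.findFrom l wd.1 0 none))
      l0 = goB l0 := by
  rw [goB_eq]
  simp only [pvNamesA, List.foldl_cons, List.foldl_nil]
  rw [perWord ['o','n','e'] '1' (by decide) (by simp) l0]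
  have h1 := compose ['o','n','e'] '1' [] (by decide) (by simp) (by decide) l0
  rw [passW_nil] at h1
  simp only [List.nil_append] at h1
  rw [h1]
  rw [stepWord ['t','w','o'] '2' [(['o','n','e'], '1')] (by decide) (by simp) (by simp) (by decide) l0]
  simp only [List.cons_append, List.nil_append]
  rw [stepWord ['t','h','r','e','e'] '3' [(['o','n','e'], '1'), (['t','w','o'], '2')] (by decide) (by simp) (by simp) (by decide) l0]
  simp only [List.cons_append, List.nil_append]
  rw [stepWord ['f','o','u','r'] '4' [(['o','n','e'], '1'), (['t','w','o'], '2'), (['t','h','r','e','e'], '3')] (by decide) (by simp) (by simp) (by decide) l0]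
  simp only [List.cons_append, List.nil_append]
  rw [stepWord ['f','i','v','e'] '5' [(['o','n','e'], '1'), (['t','w','o'], '2'), (['t','h','r','e','e'], '3'), (['f','o','u','r'], '4')] (by decide) (by simp) (by simp) (by decide) l0]
  simp only [List.cons_append, List.nil_append]
  rw [stepWord ['s','i','x'] '6' [(['o','n','e'], '1'), (['t','w','o'], '2'), (['t','h','r','e','e'], '3'), (['f','o','u','r'], '4'), (['f','i','v','e'], '5')] (by decide) (by simp) (by simp) (by decide) l0]
  simp only [List.cons_append, List.nil_append]
  rw [stepWord ['s','e','v','e','n'] '7' [(['o','n','e'], '1'), (['t','w','o'], '2'), (['t','h','r','e','e'], '3'), (['f','o','u','r'], '4'), (['f','i','v','e'], '5'), (['s','i','x'], '6')] (by decide) (by simp) (by simp) (by decide) l0]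
  simp only [List.cons_append, List.nil_append]
  rw [stepWord ['e','i','g','h','t'] '8' [(['o','n','e'], '1'), (['t','w','o'], '2'), (['t','h','r','e','e'], '3'), (['f','o','u','r'], '4'), (['f','i','v','e'], '5'), (['s','i','x'], '6'), (['s','e','v','e','n'], '7')] (by decide) (by simp) (by simp) (by decide) l0]
  simp only [List.cons_append, List.nil_append]
  rw [stepWord ['n','i','n','e'] '9' [(['o','n','e'], '1'), (['t','w','o'], '2'), (['t','h','r','e','e'], '3'), (['f','o','u','r'], '4'), (['f','i','v','e'], '5'), (['s','i','x'], '6'), (['s','e','v','e','n'], '7'), (['e','i','g','h','t'], '8')] (by decide) (by simp) (by simp) (by decide) l0]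
  simp only [List.cons_append, List.nil_append]

-- ===== VERDICT (by name: the statement is the Claim_ definition above) =====
theorem replace_string_numbers_spec : Claim_equal_replace_string_numbers := by
  intro line _
  unfold Spec_replace_string_numbers replace_string_numbers replace_string_numbers_alt
  exact congrArg String.mk (chainAll line.toList)
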